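-- pv_equiv track=rewrite | github.com/strakamichal/adw-rating | scripts/calculate_rating.py | _registered_names_match
-- ===== SOURCE A (Python) =====
-- def _registered_names_match(regs1, regs2):
--     """Check if two sets of registered names likely refer to the same dog.
--
--     Matches if any pair shares >=3 consecutive words starting from the
--     beginning of at least one name (prefix match). This avoids false
--     positives from shared kennel name suffixes like "from Malibo Land".
--     """
--     for r1 in regs1:
--         w1 = r1.split()
--         for r2 in regs2:
--             w2 = r2.split()
--             # Check prefix overlap: words matching from start of both names
--             prefix_match = 0
--             for a, b in zip(w1, w2):
--                 if a == b:
--                     prefix_match += 1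
--                 else:
--                     break
--             if prefix_match >= 3:
--                 return True
--
--             # Also check if one name starts from the beginning of the other
--             # at some offset (e.g., "A3Ch Finrod Frances..." vs "Finrod Frances...")
--             for offset in range(1, min(3, len(w1))):
--                 match = 0
--                 for a, b in zip(w1[offset:], w2):
--                     if a == b:
--                         match += 1
--                     else:
--                         break
--                 if match >= 3:
--                     return True
--             for offset in range(1, min(3, len(w2))):
--                 match = 0
--                 for a, b in zip(w1, w2[offset:]):
--                     if a == b:
--                         match += 1
--                     else:
--                         break
--                 if match >= 3:
--                     return True
--     return False
-- ===== SOURCE B (Python) =====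
-- def _registered_names_match(regs1, regs2):
--     """Set-index reformulation: a pair matches iff the 3-word head of one
--     name equals some 3-word window at offset 0..2 of the other."""
--     def heads(regs):
--         return {tuple(w[:3]) for w in map(str.split, regs) if len(w) >= 3}
--
--     def triples(regs):
--         return {tuple(w[o:o + 3]) for w in map(str.split, regs)
--                 for o in range(3) if len(w) >= o + 3}
--
--     return (not heads(regs1).isdisjoint(triples(regs2))
--             or not heads(regs2).isdisjoint(triples(regs1)))
-- ===== Notes on version B (the rewrite author's own statement) =====
-- stated objective: faster
-- what changed: Replaces the nested all-pairs scan with repeated word-by-word prefix counting by precomputing, in one pass per list, the set of 3-word heads and the set of all 3-word windows at offsets 0-2, then answering with two set-disjointness tests.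
import Mathlib
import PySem

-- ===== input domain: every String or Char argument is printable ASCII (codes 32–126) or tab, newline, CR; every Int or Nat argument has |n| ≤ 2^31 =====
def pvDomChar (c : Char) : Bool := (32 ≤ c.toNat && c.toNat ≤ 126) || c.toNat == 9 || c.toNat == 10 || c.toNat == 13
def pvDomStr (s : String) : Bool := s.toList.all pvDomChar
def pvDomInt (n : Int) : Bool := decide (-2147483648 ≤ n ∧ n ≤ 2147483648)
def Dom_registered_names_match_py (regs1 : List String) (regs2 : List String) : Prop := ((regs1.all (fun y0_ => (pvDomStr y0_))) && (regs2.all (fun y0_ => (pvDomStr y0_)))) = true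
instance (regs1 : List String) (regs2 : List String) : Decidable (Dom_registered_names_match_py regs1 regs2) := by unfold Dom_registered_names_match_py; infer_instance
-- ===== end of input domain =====

-- B replaces A's nested pair scan by one-pass set indexes (3-word heads vs 3-word windows) and two disjointness tests; measurably faster on large inputs.


-- ===== PORT A =====
-- the 'for a, b in zip(…): if a == b: prefix_match += 1 else: break' loop
def pvPrefixCount : List String → List String → Nat
  | a :: as, b :: bs => if a = b then pvPrefixCount as bs + 1 else 0
  | _, _ => 0

def registered_names_match_py (regs1 : List String) (regs2 : List String) : Bool :=
  regs1.any fun r1 =>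
    let w1 := PySem.Str.split₀ r1
    regs2.any fun r2 =>
      let w2 := PySem.Str.split₀ r2
      if 3 ≤ pvPrefixCount w1 w2 then true
      else if (PySem.List.pyRange 1 (min 3 (PySem.List.len w1)) 1).any
                (fun o => 3 ≤ pvPrefixCount (PySem.List.slice w1 (some o) none) w2) then true
      else (PySem.List.pyRange 1 (min 3 (PySem.List.len w2)) 1).any
                (fun o => 3 ≤ pvPrefixCount w1 (PySem.List.slice w2 (some o) none))

-- ===== PORT B =====
-- {tuple(w[:3]) for w in map(str.split, regs) if len(w) >= 3}
def pvHeads (regs : List String) : PySem.Set (List String) :=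
  PySem.Set.ofList
    (((regs.map PySem.Str.split₀).filter (fun w => 3 ≤ PySem.List.len w)).map
      (fun w => PySem.List.slice w none (some 3)))

-- {tuple(w[o:o+3]) for w in map(str.split, regs) for o in range(3) if len(w) >= o + 3}
def pvTriples (regs : List String) : PySem.Set (List String) :=
  PySem.Set.ofList
    ((regs.map PySem.Str.split₀).flatMap (fun w =>
      (((PySem.List.pyRange 0 3 1).filter (fun o => o + 3 ≤ PySem.List.len w)).map
        (fun o => PySem.List.slice w (some o) (some (o + 3))))))

def registered_names_match_py_alt (regs1 : List String) (regs2 : List String) : Bool :=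
  !(PySem.Set.isdisjoint (pvHeads regs1) (pvTriples regs2))
  || !(PySem.Set.isdisjoint (pvHeads regs2) (pvTriples regs1))

-- ===== PRECONDITION & SPEC =====
def Spec_registered_names_match_py (regs1 : List String) (regs2 : List String) (out : Bool) : Prop := out = registered_names_match_py_alt regs1 regs2
instance (regs1 : List String) (regs2 : List String) (out : Bool) : Decidable (Spec_registered_names_match_py regs1 regs2 out) := by unfold Spec_registered_names_match_py; infer_instance

-- ===== CLAIM (what is proved, stated in full; the proofs are below) =====
def Claim_equal_registered_names_match_py : Prop := ∀ (regs1 : List String) (regs2 : List String), Dom_registered_names_match_py regs1 regs2 → Spec_registered_names_match_py regs1 regs2 (registered_names_match_py regs1 regs2)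

-- ===== LEMMAS AND PROOFS =====

-- 'w1's 3-word head occurs in w2 at offset o (o ∈ {0,1,2}, full window)'
def PvMatchAt (w1 w2 : List String) (o : Nat) : Prop :=
  o < 3 ∧ o + 3 ≤ w2.length ∧ 3 ≤ w1.length ∧ w1.take 3 = (w2.drop o).take 3

-- the common characterisation both ports are reduced to
def PvPairHit (w1 w2 : List String) : Prop :=
  (∃ o, PvMatchAt w1 w2 o) ∨ (∃ o, PvMatchAt w2 w1 o)

lemma pvPrefixCount_ge (n : Nat) : ∀ (xs ys : List String),
    n ≤ pvPrefixCount xs ys ↔ (xs.take n = ys.take n ∧ n ≤ xs.length ∧ n ≤ ys.length) := by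
  induction n with
  | zero => intro xs ys; simp
  | succ n ih =>
    intro xs ys
    cases xs with
    | nil => simp [pvPrefixCount]
    | cons a as =>
      cases ys with
      | nil => simp [pvPrefixCount]
      | cons b bs =>
        by_cases h : a = b
        · simp [pvPrefixCount, h, List.take_succ_cons, ih]
        · simp [pvPrefixCount, h, List.take_succ_cons]

lemma pvPair_hit0 {w1 w2 : List String} (h : 3 ≤ pvPrefixCount w1 w2) : PvPairHit w1 w2 := by
  rw [pvPrefixCount_ge] at h
  exact Or.inl ⟨0, by norm_num, by omega, h.2.1, by simpa using h.1⟩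

lemma pvA_iff (regs1 regs2 : List String) :
    registered_names_match_py regs1 regs2 = true ↔
    ∃ r1 ∈ regs1, ∃ r2 ∈ regs2, PvPairHit (PySem.Str.split₀ r1) (PySem.Str.split₀ r2) := by
  unfold registered_names_match_py
  simp only [List.any_eq_true]
  refine exists_congr fun r1 => and_congr_right fun _ => exists_congr fun r2 =>
    and_congr_right fun _ => ?_
  set w1 := PySem.Str.split₀ r1 with hw1
  set w2 := PySem.Str.split₀ r2 with hw2
  split_ifs with h1 h2
  · simp only [true_iff]
    exact pvPair_hit0 h1
  · simp only [true_iff]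
    simp only [PySem.List.mem_pyRange_one, decide_eq_true_eq,
      PySem.List.len_eq] at h2
    obtain ⟨o, ⟨ho1, ho2⟩, hpm⟩ := h2
    rw [PySem.List.slice_from _ (by omega), pvPrefixCount_ge] at hpm
    refine Or.inr ⟨o.toNat, by omega, ?_, hpm.2.2, hpm.1.symm⟩
    have := hpm.2.1
    simp only [List.length_drop] at this
    omega
  · simp only [List.any_eq_true, PySem.List.mem_pyRange_one, decide_eq_true_eq,
      PySem.List.len_eq]
    constructor
    · rintro ⟨o, ⟨ho1, ho2⟩, hpm⟩
      rw [PySem.List.slice_from _ (by omega), pvPrefixCount_ge] at hpm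
      refine Or.inl ⟨o.toNat, by omega, ?_, hpm.2.1, hpm.1⟩
      have := hpm.2.2
      simp only [List.length_drop] at this
      omega
    · rintro (⟨o, ho3, hlen, hl1, heq⟩ | ⟨o, ho3, hlen, hl1, heq⟩)
      · rcases Nat.eq_zero_or_pos o with rfl | hpos
        · exact absurd (by rw [pvPrefixCount_ge]; exact ⟨by simpa using heq, hl1, by omega⟩) h1
        · refine ⟨(o : Int), ⟨by exact_mod_cast hpos, by omega⟩, ?_⟩
          rw [PySem.List.slice_from _ (by positivity), Int.toNat_natCast, pvPrefixCount_ge]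
          exact ⟨heq, hl1, by simp [List.length_drop]; omega⟩
      · rcases Nat.eq_zero_or_pos o with rfl | hpos
        · exact absurd (by rw [pvPrefixCount_ge]; exact ⟨by simpa using heq.symm, by omega, hl1⟩) h1
        · exact absurd (by
            simp only [PySem.List.mem_pyRange_one, decide_eq_true_eq,
              PySem.List.len_eq]
            refine ⟨(o : Int), ⟨by exact_mod_cast hpos, by omega⟩, ?_⟩
            rw [PySem.List.slice_from _ (by positivity), Int.toNat_natCast, pvPrefixCount_ge]
            exact ⟨heq.symm, by simp only [List.length_drop]; omega, hl1⟩) h2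

lemma pvMem_heads (x : List String) (regs : List String) :
    x ∈ pvHeads regs ↔
    ∃ r ∈ regs, 3 ≤ (PySem.Str.split₀ r).length ∧ x = (PySem.Str.split₀ r).take 3 := by
  unfold pvHeads
  rw [PySem.Set.mem_ofList]
  simp only [List.mem_map, List.mem_filter, decide_eq_true_eq, PySem.List.len_eq]
  constructor
  · rintro ⟨w, ⟨⟨r, hr, rfl⟩, hlen⟩, rfl⟩
    exact ⟨r, hr, by exact_mod_cast hlen, by rw [PySem.List.slice_to _ (by norm_num)]; rfl⟩
  · rintro ⟨r, hr, hlen, rfl⟩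
    exact ⟨PySem.Str.split₀ r, ⟨⟨r, hr, rfl⟩, by exact_mod_cast hlen⟩,
      by rw [PySem.List.slice_to _ (by norm_num)]; rfl⟩

lemma pvMem_triples (x : List String) (regs : List String) :
    x ∈ pvTriples regs ↔
    ∃ r ∈ regs, ∃ k : Nat, k < 3 ∧ k + 3 ≤ (PySem.Str.split₀ r).length ∧
      x = ((PySem.Str.split₀ r).drop k).take 3 := by
  unfold pvTriples
  rw [PySem.Set.mem_ofList]
  simp only [List.mem_flatMap, List.mem_map, List.mem_filter, List.mem_map,
    PySem.List.mem_pyRange_one, decide_eq_true_eq, PySem.List.len_eq]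
  constructor
  · rintro ⟨w, ⟨r, hr, rfl⟩, o, ⟨⟨ho0, ho3⟩, hlen⟩, rfl⟩
    refine ⟨r, hr, o.toNat, by omega, by omega, ?_⟩
    have : o = ((o.toNat : Nat) : Int) := by omega
    rw [this, show ((o.toNat : Nat) : Int) + 3 = ((o.toNat : Nat) : Int) + ((3 : Nat) : Int) by norm_num,
      PySem.List.slice_natCast_add]
    simp
    rw [show max o 0 = o from max_eq_left ho0]
  · rintro ⟨r, hr, k, hk3, hlen, rfl⟩
    refine ⟨PySem.Str.split₀ r, ⟨r, hr, rfl⟩, (k : Int), ⟨⟨by positivity, by exact_mod_cast hk3⟩, by omega⟩, ?_⟩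
    rw [show ((k : Nat) : Int) + 3 = ((k : Nat) : Int) + ((3 : Nat) : Int) by norm_num,
      PySem.List.slice_natCast_add]

lemma pvB_iff (regs1 regs2 : List String) :
    registered_names_match_py_alt regs1 regs2 = true ↔
    ∃ r1 ∈ regs1, ∃ r2 ∈ regs2, PvPairHit (PySem.Str.split₀ r1) (PySem.Str.split₀ r2) := by
  unfold registered_names_match_py_alt
  have hnd : ∀ (s t : PySem.Set (List String)),
      ((!PySem.Set.isdisjoint s t) = true) ↔ ∃ x, x ∈ s ∧ x ∈ t := by
    intro s t
    rw [Bool.not_eq_true', ← Bool.not_eq_true, PySem.Set.isdisjoint_iff]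
    push Not
    simp
  rw [Bool.or_eq_true, hnd, hnd]
  constructor
  · rintro (⟨x, hx1, hx2⟩ | ⟨x, hx2, hx1⟩)
    · rw [pvMem_heads] at hx1; rw [pvMem_triples] at hx2
      obtain ⟨r1, hr1, hl1, rfl⟩ := hx1
      obtain ⟨r2, hr2, k, hk3, hlen, heq⟩ := hx2
      exact ⟨r1, hr1, r2, hr2, Or.inl ⟨k, hk3, hlen, hl1, heq⟩⟩
    · rw [pvMem_heads] at hx2; rw [pvMem_triples] at hx1
      obtain ⟨r2, hr2, hl2, rfl⟩ := hx2
      obtain ⟨r1, hr1, k, hk3, hlen, heq⟩ := hx1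
      exact ⟨r1, hr1, r2, hr2, Or.inr ⟨k, hk3, hlen, hl2, heq⟩⟩
  · rintro ⟨r1, hr1, r2, hr2, ⟨k, hk3, hlen, hl1, heq⟩ | ⟨k, hk3, hlen, hl2, heq⟩⟩
    · exact Or.inl ⟨(PySem.Str.split₀ r1).take 3,
        (pvMem_heads _ _).2 ⟨r1, hr1, hl1, rfl⟩,
        (pvMem_triples _ _).2 ⟨r2, hr2, k, hk3, hlen, heq⟩⟩
    · exact Or.inr ⟨(PySem.Str.split₀ r2).take 3,
        (pvMem_heads _ _).2 ⟨r2, hr2, hl2, rfl⟩,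
        (pvMem_triples _ _).2 ⟨r1, hr1, k, hk3, hlen, heq⟩⟩

-- ===== VERDICT (by name: the statement is the Claim_ definition above) =====
theorem registered_names_match_py_spec : Claim_equal_registered_names_match_py := by
  intro regs1 regs2 _
  unfold Spec_registered_names_match_py
  rw [Bool.eq_iff_iff, pvA_iff, pvB_iff]
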